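-- pv_equiv track=rewrite | github.com/gavrik/goit-crypt-hw-02 | permutations.py | permutation_encrypt
-- ===== SOURCE A (Python) =====
-- def create_permutation(secret_key):
--     return sorted(range(len(secret_key)), key=lambda k: secret_key[k])
--
-- def permutation_encrypt(secret_key, text):
--     permutation = create_permutation(secret_key)
--     bsize = len(secret_key)
--     cipher_text = ''
--     for i in range(0, len(text), bsize):
--         cblock = text[i:i + bsize]
--         if len(cblock) < bsize:
--             cblock += ' ' * (bsize - len(cblock))
--         encrblock = ''.join(cblock[j] for j in permutation)
--         cipher_text += encrblock
--     return cipher_text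
-- ===== SOURCE B (Python) =====
-- def permutation_encrypt(secret_key, text):
--     bsize = len(secret_key)
--     nblocks = -(-len(text) // bsize)
--     smaller = {}
--     for c in secret_key:
--         if c not in smaller:
--             smaller[c] = sum(1 for d in secret_key if d < c)
--     seen = {}
--     rank = []
--     for c in secret_key:
--         e = seen.get(c, 0)
--         rank.append(smaller[c] + e)
--         seen[c] = e + 1
--     out = [' '] * (nblocks * bsize)
--     for t, ch in enumerate(text):
--         blk, j = divmod(t, bsize)
--         out[blk * bsize + rank[j]] = ch
--     return ''.join(out)
-- ===== Notes on version B (the rewrite author's own statement) =====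
-- stated objective: alternative
-- what changed: B never sorts: it builds each character's rank (the inverse permutation) from a memoised count of strictly smaller key characters plus a running duplicate counter, and scatters every plaintext character directly into a preallocated space-filled output buffer at block*bsize+rank, instead of A's argsort of key indices followed by per-block slice/pad/gather with a string accumulator.
import Mathlib
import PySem

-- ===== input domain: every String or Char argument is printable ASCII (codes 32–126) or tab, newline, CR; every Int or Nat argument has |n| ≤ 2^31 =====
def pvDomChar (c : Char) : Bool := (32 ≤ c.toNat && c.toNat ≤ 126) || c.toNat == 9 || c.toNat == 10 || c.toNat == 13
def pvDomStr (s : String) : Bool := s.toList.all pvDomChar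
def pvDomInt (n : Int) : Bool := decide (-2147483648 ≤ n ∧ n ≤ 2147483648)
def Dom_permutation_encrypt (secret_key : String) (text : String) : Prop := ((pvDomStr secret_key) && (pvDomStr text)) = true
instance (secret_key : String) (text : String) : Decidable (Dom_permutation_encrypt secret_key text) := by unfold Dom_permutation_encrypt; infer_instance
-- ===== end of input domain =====

-- B never sorts: it builds each character's output rank from a memoised
-- smaller-character count plus a running duplicate counter, and scatters every
-- plaintext character straight into a preallocated space-filled buffer —
-- no argsort, no per-block slice/pad/gather, no string accumulator.

-- ===== PORT A =====
def create_permutation (secret_key : String) : List Int :=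
  PySem.List.sorted (PySem.List.pyRange 0 (PySem.Str.len secret_key) 1)
    (fun k => PySem.List.pyGetD secret_key.toList k ' ')

def permutation_encrypt (secret_key : String) (text : String) : String :=
  let permutation := create_permutation secret_key
  let bsize : Int := PySem.Str.len secret_key
  let cipher_text : List Char :=
    (PySem.List.pyRange 0 (PySem.Str.len text) bsize).foldl (fun acc i =>
      let cblock := PySem.List.slice text.toList (some i) (some (i + bsize))
      let cblock := if (cblock.length : Int) < bsize
        then cblock ++ List.replicate (bsize - (cblock.length : Int)).toNat ' '
        else cblock
      let encrblock := permutation.map (fun j => PySem.List.pyGetD cblock j ' ')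
      acc ++ encrblock) []
  String.ofList cipher_text

-- ===== PORT B =====
-- rank[k] = (# key chars smaller than key[k]) + (# earlier equal key chars):
-- a memoised smaller-count per distinct character plus a running duplicate counter.
def pv_alt_rank (secret_key : String) : List Int :=
  let smaller : PySem.Dict Char Int := secret_key.toList.foldl (fun d c =>
    if PySem.Dict.contains d c = true then d
    else PySem.Dict.insert d c ((secret_key.toList.map (fun dc =>
      if dc < c then (1 : Int) else 0)).sum)) PySem.Dict.empty
  -- smaller[c]: c was inserted by the first loop, so the lookup never fails
  ((secret_key.toList.foldl (fun (st : PySem.Dict Char Int × List Int) c =>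
    let e := PySem.Dict.getD st.1 c 0
    (PySem.Dict.insert st.1 c (e + 1),
     st.2 ++ [PySem.Dict.getD smaller c 0 + e])) (PySem.Dict.empty, []))).2

def permutation_encrypt_alt (secret_key : String) (text : String) : String :=
  let bsize : Int := PySem.Str.len secret_key
  -- nblocks = -(-len(text) // bsize)  (ceiling division, Python's idiom)
  let nblocks : Int := -(PySem.Int.floordiv (-(PySem.Str.len text)) bsize)
  let rank : List Int := pv_alt_rank secret_key
  let out : List Char := List.replicate (nblocks * bsize).toNat ' '
  -- out[blk*bsize + rank[j]] = ch: the index is a nonnegative in-range Int, so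
  -- Python's list assignment is exactly List.set at its toNat.
  let out := (PySem.List.enumerate text.toList).foldl (fun o p =>
    let blk := PySem.Int.floordiv p.1 bsize
    let j := PySem.Int.mod p.1 bsize
    o.set (blk * bsize + PySem.List.pyGetD rank j 0).toNat p.2) out
  String.ofList out

-- ===== PRECONDITION & SPEC =====
-- Pre_ excludes exactly the empty secret_key, on which both Pythons raise
-- (A: ValueError from range() with step 0; B: ZeroDivisionError).
def Pre_permutation_encrypt (secret_key : String) (text : String) : Prop :=
  secret_key.toList ≠ []
instance (secret_key : String) (text : String) : Decidable (Pre_permutation_encrypt secret_key text) := by unfold Pre_permutation_encrypt; infer_instance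

def pvWitness_permutation_encrypt : String × String := ("bca", "hello!")

def Spec_permutation_encrypt (secret_key : String) (text : String) (out : String) : Prop := out = permutation_encrypt_alt secret_key text
instance (secret_key : String) (text : String) (out : String) : Decidable (Spec_permutation_encrypt secret_key text out) := by unfold Spec_permutation_encrypt; infer_instance

-- ===== CLAIM (what is proved, stated in full; the proofs are below) =====
def Claim_equal_permutation_encrypt : Prop := ∀ (secret_key : String) (text : String), Dom_permutation_encrypt secret_key text → Pre_permutation_encrypt secret_key text → Spec_permutation_encrypt secret_key text (permutation_encrypt secret_key text)

-- ===== LEMMAS AND PROOFS =====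

-- Abbreviations for the proof: block size, key lookup, A's argsort, B's rank.
abbrev pvB (sk : String) : Nat := sk.toList.length
abbrev pvKey (sk : String) : Int → Char := fun k => PySem.List.pyGetD sk.toList k ' '
-- the stable-sort order relation: strictly smaller key, or equal key and smaller index
def pvRb (key : Int → Char) (m k : Int) : Bool :=
  decide (key m < key k) || (decide (key m = key k) && decide (m < k))
def pvPerm (sk : String) : List Int :=
  PySem.List.sorted (PySem.List.pyRange 0 ((pvB sk : Nat) : Int) 1) (pvKey sk)
def pvPermN (sk : String) (pos : Nat) : Nat := ((pvPerm sk).getD pos 0).toNat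
def pvRankN (sk : String) (j : Int) : Nat :=
  (PySem.List.pyRange 0 ((pvB sk : Nat) : Int) 1).countP (fun m => pvRb (pvKey sk) m j)
def pvNB (sk text : String) : Nat := (text.toList.length + pvB sk - 1) / pvB sk
def pvPad (sk text : String) : List Char :=
  text.toList ++ List.replicate (pvNB sk text * pvB sk - text.toList.length) ' '
-- the common model both ports are reduced to
def pvModel (sk text : String) : List Char :=
  (List.range (pvNB sk text)).flatMap (fun blk =>
    (List.range (pvB sk)).map (fun pos =>
      (pvPad sk text).getD (blk * pvB sk + pvPermN sk pos) ' '))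

theorem pvRb_irrefl (key : Int → Char) (a : Int) : pvRb key a a = false := by
  simp [pvRb]

theorem pvRb_asymm (key : Int → Char) (a c : Int) (h : pvRb key a c = true) :
    pvRb key c a = false := by
  rw [← Bool.not_eq_true]
  intro h'
  simp only [pvRb, Bool.or_eq_true, Bool.and_eq_true, decide_eq_true_eq] at h h'
  rcases h with h | ⟨h, ha⟩ <;> rcases h' with h' | ⟨h', ha'⟩
  · exact absurd h' (lt_asymm h)
  · exact absurd h (by rw [h']; exact lt_irrefl _)
  · exact absurd h' (by rw [h]; exact lt_irrefl _)
  · omega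

-- Appending spaces never changes a space-default lookup: the pad IS the default.
theorem pv_getD_pad (xs : List Char) (p k : Nat) :
    (xs ++ List.replicate p ' ').getD k ' ' = xs.getD k ' ' := by
  rcases Nat.lt_or_ge k xs.length with h | h
  · rw [List.getD_eq_getElem?_getD, List.getD_eq_getElem?_getD,
      List.getElem?_append_left h]
  · rw [List.getD_eq_getElem?_getD, List.getD_eq_getElem?_getD,
      List.getElem?_append_right h, List.getElem?_replicate,
      List.getElem?_eq_none (by omega)]
    split <;> simp

-- A's padded block, read at j < b, is the once-padded text read at i + j.
theorem pv_block_point (tl : List Char) (b ni nj : Nat) (hjb : nj < b) :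
    ((tl.drop ni).take b).getD nj ' ' = tl.getD (ni + nj) ' ' := by
  rw [List.getD_eq_getElem?_getD, List.getD_eq_getElem?_getD,
    List.getElem?_take, if_pos hjb, List.getElem?_drop]

-- STABILITY of insertion sort: inserting an index larger than everything present
-- keeps the list pairwise-ordered by pvRb.
theorem pv_insertBy_R (key : Int → Char) (x : Int) (acc : List Int)
    (hp : acc.Pairwise (fun a c => pvRb key a c = true))
    (hlt : ∀ a ∈ acc, a < x) :
    (PySem.List.insertBy (fun a c => decide (key a < key c)) x acc).Pairwise
      (fun a c => pvRb key a c = true) := by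
  induction acc with
  | nil => simp [PySem.List.insertBy]
  | cons y ys ih =>
    rcases List.pairwise_cons.mp hp with ⟨hy, hys⟩
    by_cases h : key x < key y
    · simp only [PySem.List.insertBy, decide_eq_true_eq, if_pos h]
      refine List.pairwise_cons.mpr ⟨?_, hp⟩
      intro z hz
      rcases List.mem_cons.mp hz with rfl | hz
      · simp [pvRb, h]
      · have := hy z hz
        simp only [pvRb, Bool.or_eq_true, decide_eq_true_eq, Bool.and_eq_true] at this ⊢
        rcases this with h2 | ⟨h2, _⟩
        · exact Or.inl (lt_trans h h2)
        · exact Or.inl (h2 ▸ h)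
    · simp only [PySem.List.insertBy, decide_eq_true_eq, if_neg h]
      refine List.pairwise_cons.mpr ⟨?_, ih hys (fun a ha => hlt a (List.mem_cons_of_mem _ ha))⟩
      intro z hz
      rcases (PySem.List.mem_insertBy _ _ _ _).mp hz with rfl | hz
      · have hyx : y < z := hlt y List.mem_cons_self
        rcases lt_or_eq_of_le (le_of_not_gt h) with h2 | h2
        · simp [pvRb, h2]
        · simp [pvRb, h2, hyx]
      · exact hy z hz

theorem pv_foldl_insertBy_R (key : Int → Char) (xs acc : List Int)
    (hxs : xs.Pairwise (· < ·))
    (hp : acc.Pairwise (fun a c => pvRb key a c = true))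
    (hlt : ∀ a ∈ acc, ∀ x ∈ xs, a < x) :
    (xs.foldl (fun acc x => PySem.List.insertBy (fun a c => decide (key a < key c)) x acc) acc).Pairwise
      (fun a c => pvRb key a c = true) := by
  induction xs generalizing acc with
  | nil => exact hp
  | cons x xs ih =>
    rcases List.pairwise_cons.mp hxs with ⟨hx, hxs'⟩
    refine ih _ hxs' (pv_insertBy_R key x acc hp
      (fun a ha => hlt a ha x List.mem_cons_self)) ?_
    intro a ha x' hx'
    rcases (PySem.List.mem_insertBy _ _ _ _).mp ha with rfl | ha
    · exact hx x' hx'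
    · exact hlt a ha x' (List.mem_cons_of_mem _ hx')

theorem pv_perm_pairwise (sk : String) :
    (pvPerm sk).Pairwise (fun a c => pvRb (pvKey sk) a c = true) := by
  unfold pvPerm
  rw [PySem.List.sorted_eq_foldl_insertBy]
  exact pv_foldl_insertBy_R (pvKey sk) _ []
    (PySem.List.pairwise_lt_pyRange_one 0 _) List.Pairwise.nil
    (fun a ha => absurd ha (List.not_mem_nil))

-- counting predecessors in a strictly pvRb-ordered list gives the position
theorem pv_countP_pairwise {α : Type} (Rb : α → α → Bool) (ys : List α)
    (hpair : ys.Pairwise (fun a c => Rb a c = true))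
    (hirr : ∀ a, Rb a a = false)
    (hasym : ∀ a c, Rb a c = true → Rb c a = false)
    (pos : Nat) (hpos : pos < ys.length) :
    ys.countP (fun m => Rb m ys[pos]) = pos := by
  induction ys generalizing pos with
  | nil => simp at hpos
  | cons y t ih =>
    rcases List.pairwise_cons.mp hpair with ⟨hy, ht⟩
    cases pos with
    | zero =>
      have hz : List.countP (fun m => Rb m y) t = 0 :=
        List.countP_eq_zero.mpr (fun m hm => by simp [hasym y m (hy m hm)])
      simp [hirr y, hz]
    | succ p =>
      have hp : p < t.length := by simpa using hpos
      simp only [List.getElem_cons_succ, List.countP_cons,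
        hy t[p] (List.getElem_mem hp)]
      rw [ih ht p hp]
      simp

-- find? of a uniquely-satisfying element
theorem pv_find?_unique {α : Type} (p : α → Bool) (l : List α) (x : α)
    (hx : x ∈ l) (hpx : p x = true) (hu : ∀ y ∈ l, p y = true → y = x) :
    l.find? p = some x := by
  induction l with
  | nil => simp at hx
  | cons a t ih =>
    by_cases ha : p a = true
    · rw [List.find?_cons_of_pos ha, hu a List.mem_cons_self ha]
    · rw [List.find?_cons_of_neg (by simpa using ha)]
      rcases List.mem_cons.mp hx with rfl | hx'
      · exact absurd hpx ha
      · exact ih hx' (fun y hy => hu y (List.mem_cons_of_mem _ hy))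

-- scatter loop: length is preserved, and reading back finds the last write
theorem pv_scatter_length (g : Int → Nat) (ps : List (Int × Char)) (acc : List Char) :
    (ps.foldl (fun o p => o.set (g p.1) p.2) acc).length = acc.length := by
  induction ps generalizing acc with
  | nil => rfl
  | cons p ps ih => simp [List.foldl_cons, ih]

theorem pv_scatter_get (g : Int → Nat) (ps : List (Int × Char)) (acc : List Char)
    (q : Nat) (hq : q < acc.length) :
    (ps.foldl (fun o p => o.set (g p.1) p.2) acc)[q]? =
      match ps.reverse.find? (fun p => g p.1 == q) with
      | some p => some p.2
      | none => acc[q]? := by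
  induction ps using List.reverseRecOn with
  | nil => simp
  | append_singleton ps p ih =>
    rw [List.foldl_append]
    simp only [List.foldl_cons, List.foldl_nil, List.reverse_append,
      List.reverse_cons, List.reverse_nil, List.nil_append, List.cons_append,
      List.find?_cons]
    by_cases h : g p.1 = q
    · simp only [h, beq_self_eq_true]
      rw [List.getElem?_set, if_pos rfl, if_pos (by rw [pv_scatter_length]; exact hq)]
    · have hne : (g p.1 == q) = false := by simp [h]
      simp only [hne]
      rw [List.getElem?_set, if_neg h, ih]

-- flatMap of uniformly b-sized blocks: length and pointwise characterisation
theorem pv_flatMap_len (f : Nat → List Char) (b m : Nat)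
    (hf : ∀ k < m, (f k).length = b) :
    ((List.range m).flatMap f).length = m * b := by
  induction m with
  | zero => simp
  | succ m ih =>
    rw [List.range_succ, List.flatMap_append]
    simp only [List.length_append, List.flatMap_cons, List.flatMap_nil, List.append_nil]
    rw [ih (fun k hk => hf k (Nat.lt_succ_of_lt hk)), hf m (Nat.lt_succ_self m)]
    ring

theorem pv_flatMap_get (f : Nat → List Char) (b m : Nat)
    (hf : ∀ k < m, (f k).length = b) (q : Nat) (hq : q < m * b) :
    ((List.range m).flatMap f)[q]? = (f (q / b))[q % b]? := by
  induction m with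
  | zero => simp at hq
  | succ m ih =>
    rw [List.range_succ, List.flatMap_append]
    simp only [List.flatMap_cons, List.flatMap_nil, List.append_nil]
    have hlen : ((List.range m).flatMap f).length = m * b :=
      pv_flatMap_len f b m (fun k hk => hf k (Nat.lt_succ_of_lt hk))
    rcases Nat.lt_or_ge q (m * b) with h | h
    · rw [List.getElem?_append_left (by omega),
        ih (fun k hk => hf k (Nat.lt_succ_of_lt hk)) h]
    · rw [List.getElem?_append_right (by omega), hlen]
      have hdiv : q / b = m := Nat.div_eq_of_lt_le h hq
      have h2 := Nat.div_add_mod q b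
      rw [hdiv, Nat.mul_comm b m] at h2
      have hmod : q - m * b = q % b := by
        obtain ⟨P, hP⟩ : ∃ P, m * b = P := ⟨_, rfl⟩
        rw [hP] at h2 ⊢
        omega
      rw [hdiv, hmod]

-- basic facts about pvPerm
theorem pv_perm_length (sk : String) : (pvPerm sk).length = pvB sk := by
  unfold pvPerm
  rw [PySem.List.length_sorted, PySem.List.length_pyRange_one]
  simp

theorem pv_perm_mem (sk : String) (x : Int) (hx : x ∈ pvPerm sk) :
    0 ≤ x ∧ x < (pvB sk : Int) := by
  unfold pvPerm at hx
  rw [PySem.List.mem_sorted, PySem.List.mem_pyRange_one] at hx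
  exact hx

-- the rank of the pos-th sorted index is pos
theorem pv_rank_perm (sk : String) (pos : Nat) (hpos : pos < (pvPerm sk).length) :
    pvRankN sk (pvPerm sk)[pos] = pos := by
  unfold pvRankN
  have hperm : (pvPerm sk).Perm (PySem.List.pyRange 0 ((pvB sk : Nat) : Int) 1) :=
    PySem.List.sorted_perm _ _ _
  rw [← hperm.countP_eq]
  exact pv_countP_pairwise (pvRb (pvKey sk)) (pvPerm sk) (pv_perm_pairwise sk)
    (pvRb_irrefl _) (pvRb_asymm _) pos hpos

-- every index j < b sits in pvPerm at position pvRankN j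
theorem pv_perm_rank (sk : String) (j : Int) (h0 : 0 ≤ j) (hj : j < (pvB sk : Int)) :
    pvRankN sk j < pvB sk ∧
      ∃ (h : pvRankN sk j < (pvPerm sk).length), (pvPerm sk)[pvRankN sk j] = j := by
  have hmem : j ∈ pvPerm sk := by
    unfold pvPerm
    rw [PySem.List.mem_sorted, PySem.List.mem_pyRange_one]
    exact ⟨h0, hj⟩
  obtain ⟨posj, hposj, heq⟩ := List.getElem_of_mem hmem
  have hr : pvRankN sk j = posj := by rw [← heq]; exact pv_rank_perm sk posj hposj
  refine ⟨by rw [hr, ← pv_perm_length sk]; exact hposj, by rw [hr]; exact ⟨hposj, heq⟩⟩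

-- ceiling-division bridge: B's nblocks is pvNB
theorem pv_nblocks (sk text : String) (hb : 0 < pvB sk) :
    -(PySem.Int.floordiv (-(text.toList.length : Int)) ((pvB sk : Nat) : Int)) =
      ((pvNB sk text : Nat) : Int) := by
  have hbi : (0 : Int) < (pvB sk : Int) := by exact_mod_cast hb
  rw [PySem.Int.neg_floordiv_neg_eq_iff_of_pos hbi]
  rcases Nat.eq_zero_or_pos text.toList.length with hn | hn
  · have h0 : pvNB sk text = 0 := by
      unfold pvNB
      rw [hn]
      exact Nat.div_eq_of_lt (by omega)
    rw [h0, hn]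
    refine ⟨by push_cast; linarith, by push_cast; simp⟩
  · have hnb : pvNB sk text = (text.toList.length - 1) / pvB sk + 1 := by
      unfold pvNB
      rw [show text.toList.length + pvB sk - 1 = (text.toList.length - 1) + pvB sk by omega,
        Nat.add_div_right _ hb]
    rw [hnb]
    have hdm := Nat.div_add_mod (text.toList.length - 1) (pvB sk)
    have hc : ((text.toList.length - 1 : Nat) : Int) = (text.toList.length : Int) - 1 := by
      omega
    have hdm' : ((pvB sk : Nat) : Int) * (((text.toList.length - 1) / pvB sk : Nat) : Int) +
        (((text.toList.length - 1) % pvB sk : Nat) : Int) = (text.toList.length : Int) - 1 := by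
      rw [← hc]
      exact_mod_cast congrArg (Nat.cast : Nat → Int) hdm
    have hml : (((text.toList.length - 1) % pvB sk : Nat) : Int) < ((pvB sk : Nat) : Int) := by
      exact_mod_cast Nat.mod_lt _ hb
    have hr0 : (0 : Int) ≤ (((text.toList.length - 1) % pvB sk : Nat) : Int) :=
      Int.natCast_nonneg _
    constructor
    · rw [Nat.cast_add, Nat.cast_one]
      linarith
    · rw [Nat.cast_add, Nat.cast_one]
      linarith

-- A's list of block starts has pvNB blocks, the k-th starting at b*k
theorem pv_starts (sk text : String) (hb : 0 < pvB sk) :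
    PySem.List.pyRange 0 (text.toList.length : Int) ((pvB sk : Nat) : Int) =
      (List.range (pvNB sk text)).map (fun k : Nat => ((pvB sk : Nat) : Int) * (k : Int)) := by
  rw [PySem.List.pyRange_of_pos 0 (text.toList.length : Int) (by exact_mod_cast hb)]
  have hcnt : (if (0 : Int) < (text.toList.length : Int) then
      (((text.toList.length : Int) - 0 + (pvB sk : Nat) - 1) / ((pvB sk : Nat) : Int)).toNat
      else 0) = pvNB sk text := by
    rcases Nat.eq_zero_or_pos text.toList.length with hn | hn
    · rw [if_neg (by rw [hn]; norm_num)]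
      unfold pvNB
      rw [hn]
      exact (Nat.div_eq_of_lt (by omega)).symm
    · rw [if_pos (by exact_mod_cast hn)]
      have hc : ((text.toList.length : Int) - 0 + (pvB sk : Nat) - 1) =
          ((text.toList.length + pvB sk - 1 : Nat) : Int) := by omega
      rw [hc, ← Int.natCast_div, Int.toNat_natCast]
      rfl
  rw [hcnt]
  apply List.map_congr_left
  intro k _
  ring

-- base-b uniqueness of quotient/remainder pairs
theorem pv_base_b (b x y r s : Nat) (hr : r < b) (hs : s < b)
    (h : x * b + r = y * b + s) : x = y ∧ r = s := by
  have hx : x = y := by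
    rcases Nat.lt_trichotomy x y with h' | h' | h'
    · nlinarith
    · exact h'
    · nlinarith
  subst hx
  exact ⟨rfl, by omega⟩

-- A equals the model
theorem pv_A_eq (sk text : String) (hpre : sk.toList ≠ []) :
    permutation_encrypt sk text = String.ofList (pvModel sk text) := by
  have hb : 0 < pvB sk := List.length_pos_iff.mpr hpre
  unfold permutation_encrypt create_permutation pvModel
  simp only [PySem.Str.len_eq]
  rw [PySem.List.foldl_append_eq_flatMap, List.nil_append]
  congr 1
  rw [show (PySem.List.sorted (PySem.List.pyRange 0 (sk.toList.length : Int) 1)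
      fun k => PySem.List.pyGetD sk.toList k ' ') = pvPerm sk from rfl]
  rw [pv_starts sk text hb, List.flatMap_map]
  apply List.flatMap_congr
  intro k hk
  rw [List.mem_range] at hk
  apply List.ext_getElem
  · simp [pv_perm_length]
  intro pos h1 h2
  rw [List.getElem_map, List.getElem_map, List.getElem_range]
  have hpos : pos < (pvPerm sk).length := by simpa using h1
  have hmem : (pvPerm sk)[pos] ∈ pvPerm sk := List.getElem_mem hpos
  obtain ⟨hj0, hjb⟩ := pv_perm_mem sk _ hmem
  have hn : pvPermN sk pos = ((pvPerm sk)[pos]).toNat := by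
    unfold pvPermN
    rw [List.getD_eq_getElem _ _ hpos]
  have hcast : (pvPerm sk)[pos] = ((pvPermN sk pos : Nat) : Int) := by
    rw [hn, Int.toNat_of_nonneg hj0]
  have hnb : pvPermN sk pos < pvB sk := by
    have := hjb
    rw [hcast] at this
    exact_mod_cast this
  rw [hcast]
  rw [show ((pvB sk : Nat) : Int) * (k : Int) = ((pvB sk * k : Nat) : Int) by push_cast; ring,
    PySem.List.slice_natCast_add text.toList (pvB sk * k) (pvB sk),
    PySem.List.pyGetD_natCast]
  unfold pvPad
  rw [pv_getD_pad]
  split_ifs with h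
  · rw [pv_getD_pad, pv_block_point _ _ _ _ hnb, Nat.mul_comm k (pvB sk)]
  · rw [pv_block_point _ _ _ _ hnb, Nat.mul_comm k (pvB sk)]

-- pvPermN stays below the block size
theorem pv_permN_lt (sk : String) (pos : Nat) (hpos : pos < pvB sk) :
    pvPermN sk pos < pvB sk := by
  have hpos' : pos < (pvPerm sk).length := by rw [pv_perm_length]; exact hpos
  have hmem := List.getElem_mem hpos'
  obtain ⟨h0, hlt⟩ := pv_perm_mem sk _ hmem
  unfold pvPermN
  rw [List.getD_eq_getElem _ _ hpos']
  omega

-- rank of the pos-th sorted index is pos, stated through pvPermN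
theorem pv_rank_permN (sk : String) (pos : Nat) (hpos : pos < pvB sk) :
    pvRankN sk ((pvPermN sk pos : Nat) : Int) = pos := by
  have hpos' : pos < (pvPerm sk).length := by rw [pv_perm_length]; exact hpos
  have hmem := List.getElem_mem hpos'
  obtain ⟨h0, _⟩ := pv_perm_mem sk _ hmem
  have hc : ((pvPermN sk pos : Nat) : Int) = (pvPerm sk)[pos] := by
    unfold pvPermN
    rw [List.getD_eq_getElem _ _ hpos', Int.toNat_of_nonneg h0]
  rw [hc]
  exact pv_rank_perm sk pos hpos'

-- pvPermN inverts pvRankN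
theorem pv_permN_rank (sk : String) (j : Nat) (hj : j < pvB sk) :
    pvPermN sk (pvRankN sk (j : Int)) = j ∧ pvRankN sk (j : Int) < pvB sk := by
  obtain ⟨hlt, hgl, hget⟩ := pv_perm_rank sk (j : Int) (Int.natCast_nonneg j) (by exact_mod_cast hj)
  refine ⟨?_, hlt⟩
  unfold pvPermN
  rw [List.getD_eq_getElem _ _ hgl, hget, Int.toNat_natCast]

-- a memoising loop: a key once written keeps its value
theorem pv_memo_persist (val : Char → Int) (l : List Char) (d : PySem.Dict Char Int)
    (x : Char) (v : Int) (hx : PySem.Dict.get? d x = some v) :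
    PySem.Dict.get? (l.foldl (fun d c => if PySem.Dict.contains d c = true then d
      else PySem.Dict.insert d c (val c)) d) x = some v := by
  induction l generalizing d with
  | nil => exact hx
  | cons c t ih =>
    simp only [List.foldl_cons]
    by_cases hc : PySem.Dict.contains d c = true
    · rw [if_pos hc]; exact ih d hx
    · rw [if_neg hc]
      apply ih
      by_cases hxc : x = c
      · subst hxc
        rw [PySem.Dict.contains_eq_isSome_get?, hx] at hc
        simp at hc
      · rw [PySem.Dict.get?_insert_of_ne _ _ hxc]
        exact hx

-- every seen character ends up mapped to its memoised value
theorem pv_memo_get (val : Char → Int) (l : List Char) (d : PySem.Dict Char Int)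
    (hd : ∀ x v, PySem.Dict.get? d x = some v → v = val x) (x : Char) (hx : x ∈ l) :
    PySem.Dict.get? (l.foldl (fun d c => if PySem.Dict.contains d c = true then d
      else PySem.Dict.insert d c (val c)) d) x = some (val x) := by
  induction l generalizing d with
  | nil => simp at hx
  | cons c t ih =>
    simp only [List.foldl_cons]
    rcases List.mem_cons.mp hx with rfl | hx'
    · have hstep : PySem.Dict.get? (if PySem.Dict.contains d x = true then d
          else PySem.Dict.insert d x (val x)) x = some (val x) := by
        by_cases hc : PySem.Dict.contains d x = true
        · rw [if_pos hc]
          rw [PySem.Dict.contains_eq_isSome_get?] at hc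
          rcases ho : PySem.Dict.get? d x with _ | v
          · rw [ho] at hc; simp at hc
          · rw [hd x v ho]
        · rw [if_neg hc]
          exact PySem.Dict.get?_insert_self _ _ _
      exact pv_memo_persist val t _ x (val x) hstep
    · apply ih _ _ hx'
      intro y v hy
      by_cases hc : PySem.Dict.contains d c = true
      · rw [if_pos hc] at hy; exact hd y v hy
      · rw [if_neg hc] at hy
        by_cases hyc : y = c
        · subst hyc
          rw [PySem.Dict.get?_insert_self] at hy
          exact (Option.some.inj hy).symm
        · rw [PySem.Dict.get?_insert_of_ne _ _ hyc] at hy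
          exact hd y v hy

-- the 0/1-sum B memoises is the smaller-character count
theorem pv_smaller_val (cs : List Char) (c : Char) :
    ((cs.map (fun dc => if dc < c then (1 : Int) else 0)).sum) =
      ((cs.countP (fun dc => decide (dc < c)) : Nat) : Int) := by
  rw [← PySem.List.sum_map_ite_one_zero (fun dc => decide (dc < c))]
  congr 1
  apply List.map_congr_left
  intro m _
  by_cases h : m < c
  · rw [if_pos h, if_pos (by simpa using h)]
  · rw [if_neg h, if_neg (by simpa using h)]

-- B's first loop: the smaller-count table
theorem pv_smaller_getD (sk : String) (c : Char) (hc : c ∈ sk.toList) :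
    PySem.Dict.getD (sk.toList.foldl (fun d c' =>
      if PySem.Dict.contains d c' = true then d
      else PySem.Dict.insert d c' ((sk.toList.map (fun dc =>
        if dc < c' then (1 : Int) else 0)).sum)) PySem.Dict.empty) c 0
    = ((sk.toList.countP (fun dc => decide (dc < c)) : Nat) : Int) := by
  have h := pv_memo_get (fun c' => (sk.toList.map (fun dc =>
      if dc < c' then (1 : Int) else 0)).sum) sk.toList PySem.Dict.empty
    (by intro x v hx; rw [PySem.Dict.get?_empty] at hx; cases hx) c hc
  rw [PySem.Dict.getD_eq_get?_getD, h, Option.getD_some]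
  beta_reduce
  exact pv_smaller_val sk.toList c

-- functional model of B's second loop
def pvRankModel (base : Char → Int) : List Char → List Char → List Int
  | _, [] => []
  | pre, c :: suf => (base c + ((pre.count c : Nat) : Int)) :: pvRankModel base (pre ++ [c]) suf

theorem pv_rank_fold (base : Char → Int) (suf : List Char) :
    ∀ (pre : List Char) (seen : PySem.Dict Char Int) (rk : List Int),
    (∀ x, PySem.Dict.getD seen x 0 = ((pre.count x : Nat) : Int)) →
    (suf.foldl (fun (st : PySem.Dict Char Int × List Int) c =>
        (PySem.Dict.insert st.1 c (PySem.Dict.getD st.1 c 0 + 1),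
         st.2 ++ [base c + PySem.Dict.getD st.1 c 0])) (seen, rk)).2
      = rk ++ pvRankModel base pre suf := by
  induction suf with
  | nil =>
    intro pre seen rk _
    simp [pvRankModel]
  | cons c t ih =>
    intro pre seen rk h
    simp only [List.foldl_cons]
    rw [ih (pre ++ [c]) _ _ ?hseen]
    · rw [h c]
      simp [pvRankModel]
    case hseen =>
      intro x
      rw [PySem.Dict.getD_insert]
      by_cases hxc : x = c
      · subst hxc
        rw [if_pos rfl, h x]
        simp [List.count_append]
      · rw [if_neg hxc, h x]
        simp [List.count_append, List.count_cons, beq_iff_eq]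
        exact Ne.symm hxc

theorem pv_rank_model_getD (base : Char → Int) (suf : List Char) :
    ∀ (pre : List Char) (j : Nat), j < suf.length →
    (pvRankModel base pre suf).getD j 0 =
      base (suf.getD j ' ') + (((pre ++ suf.take j).count (suf.getD j ' ') : Nat) : Int) := by
  induction suf with
  | nil =>
    intro pre j hj
    simp at hj
  | cons c t ih =>
    intro pre j hj
    cases j with
    | zero => simp [pvRankModel]
    | succ j' =>
      simp only [pvRankModel, List.getD_cons_succ, List.take_succ_cons]
      rw [ih (pre ++ [c]) j' (by simpa using hj)]
      rw [List.append_assoc]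
      rfl

-- counting a disjunction of disjoint predicates
theorem pv_countP_or {α : Type} (p q : α → Bool) (l : List α)
    (h : ∀ x ∈ l, ¬(p x = true ∧ q x = true)) :
    l.countP (fun x => p x || q x) = l.countP p + l.countP q := by
  induction l with
  | nil => simp
  | cons a t ih =>
    simp only [List.countP_cons]
    rw [ih (fun x hx => h x (List.mem_cons_of_mem _ hx))]
    by_cases hp : p a = true <;> by_cases hq : q a = true
    · exact absurd ⟨hp, hq⟩ (h a List.mem_cons_self)
    all_goals simp [hp, hq] <;> omega

-- reading a list through an index range is the list itself / its prefix
theorem pv_map_range_getD (cs : List Char) (j : Nat) (hj : j ≤ cs.length) :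
    (List.range j).map (fun m => cs.getD m ' ') = cs.take j := by
  apply List.ext_getElem
  · simp [hj]
  intro i h1 h2
  simp only [List.getElem_map, List.getElem_range, List.getElem_take]
  rw [List.getD_eq_getElem]

-- splitting pvRankN into smaller-char count plus earlier-equal count
theorem pv_rankN_split (sk : String) (j : Nat) (hj : j < pvB sk) :
    ((pvRankN sk (j : Int) : Nat) : Int) =
      ((sk.toList.countP (fun dc => decide (dc < sk.toList.getD j ' ')) : Nat) : Int) +
      (((sk.toList.take j).count (sk.toList.getD j ' ') : Nat) : Int) := by
  unfold pvRankN
  have hR : PySem.List.pyRange 0 ((pvB sk : Nat) : Int) 1 =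
      (List.range (pvB sk)).map (fun k : Nat => (k : Int)) := by
    rw [PySem.List.pyRange_one]
    simp
  rw [hR, List.countP_map]
  have hpt : List.countP ((fun m => pvRb (pvKey sk) m (j : Int)) ∘ (fun k : Nat => (k : Int)))
      (List.range (pvB sk)) =
      List.countP (fun m : Nat => (decide (sk.toList.getD m ' ' < sk.toList.getD j ' ') ||
        (decide (sk.toList.getD m ' ' = sk.toList.getD j ' ') && decide (m < j))))
      (List.range (pvB sk)) := by
    apply List.countP_congr
    intro m _
    simp only [Function.comp, pvRb, pvKey, PySem.List.pyGetD_natCast]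
    simp [Nat.cast_lt]
  rw [hpt, pv_countP_or _ _ _ (by
    intro m _ hmq
    obtain ⟨h1, h2⟩ := hmq
    simp only [decide_eq_true_eq, Bool.and_eq_true] at h1 h2
    exact absurd h2.1 (ne_of_lt h1))]
  have hcs : (List.range (pvB sk)).map (fun m => sk.toList.getD m ' ') = sk.toList := by
    have h := pv_map_range_getD sk.toList (pvB sk) (le_refl _)
    rw [List.take_length] at h
    exact h
  have e1 : ∀ C : Char, List.countP (fun m : Nat => decide (sk.toList.getD m ' ' < C))
      (List.range (pvB sk)) =
      List.countP (fun dc => decide (dc < C)) sk.toList := by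
    intro C
    conv_rhs => rw [← hcs]
    rw [List.countP_map]
    rfl
  have e2 : List.countP (fun m : Nat =>
      (decide (sk.toList.getD m ' ' = sk.toList.getD j ' ') && decide (m < j)))
      (List.range (pvB sk)) = (sk.toList.take j).count (sk.toList.getD j ' ') := by
    rw [show pvB sk = j + (pvB sk - j) by omega, List.range_add, List.countP_append]
    have h2 : List.countP (fun m : Nat =>
        (decide (sk.toList.getD m ' ' = sk.toList.getD j ' ') && decide (m < j)))
        ((List.range (pvB sk - j)).map (fun x => j + x)) = 0 := by
      rw [List.countP_map]
      apply List.countP_eq_zero.mpr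
      intro m _
      simp
    rw [h2, Nat.add_zero]
    have h1 : List.countP (fun m : Nat =>
        (decide (sk.toList.getD m ' ' = sk.toList.getD j ' ') && decide (m < j)))
        (List.range j) = List.countP (fun m : Nat =>
        decide (sk.toList.getD m ' ' = sk.toList.getD j ' ')) (List.range j) := by
      apply List.countP_congr
      intro m hm
      rw [List.mem_range] at hm
      simp [hm]
    rw [h1, show (sk.toList.take j) = (List.range j).map (fun m => sk.toList.getD m ' ')
      from (pv_map_range_getD sk.toList j (le_of_lt hj)).symm]
    rw [List.count_eq_countP, List.countP_map]
    apply List.countP_congr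
    intro m _
    simp [Function.comp, beq_iff_eq]
  rw [e1 (sk.toList.getD j ' '), e2]
  push_cast
  ring

-- B's rank list, read at an in-range index, is pvRankN
theorem pv_alt_rank_elem (sk : String) (j : Nat) (hj : j < pvB sk) :
    PySem.List.pyGetD (pv_alt_rank sk) (j : Int) 0 = ((pvRankN sk (j : Int) : Nat) : Int) := by
  unfold pv_alt_rank
  simp only [PySem.List.pyGetD_natCast]
  rw [pv_rank_fold _ sk.toList [] PySem.Dict.empty []
    (by intro x; simp [PySem.Dict.getD_empty]), List.nil_append]
  rw [pv_rank_model_getD _ sk.toList [] j hj, List.nil_append]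
  have hmem : sk.toList.getD j ' ' ∈ sk.toList := by
    rw [List.getD_eq_getElem _ _ hj]
    exact List.getElem_mem hj
  rw [pv_smaller_getD sk _ hmem, pv_rankN_split sk j hj]

-- B's scatter index, on a natural input, in terms of pvRankN
theorem pv_g_spec (sk : String) (hb : 0 < pvB sk) (t : Nat) :
    (PySem.Int.floordiv (t : Int) ((pvB sk : Nat) : Int) * ((pvB sk : Nat) : Int) +
      PySem.List.pyGetD (pv_alt_rank sk)
        (PySem.Int.mod (t : Int) ((pvB sk : Nat) : Int)) 0).toNat
      = t / pvB sk * pvB sk + pvRankN sk ((t % pvB sk : Nat) : Int) := by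
  rw [PySem.Int.floordiv_natCast, PySem.Int.mod_natCast,
    pv_alt_rank_elem sk (t % pvB sk) (Nat.mod_lt _ hb)]
  rw [show ((t / pvB sk : Nat) : Int) * ((pvB sk : Nat) : Int) +
      ((pvRankN sk ((t % pvB sk : Nat) : Int) : Nat) : Int) =
      ((t / pvB sk * pvB sk + pvRankN sk ((t % pvB sk : Nat) : Int) : Nat) : Int) by
    push_cast; ring]
  exact Int.toNat_natCast _

-- the scatter index hits q exactly at the source position the model reads
theorem pv_g_iff (sk : String) (hb : 0 < pvB sk) (q t : Nat) :
    t / pvB sk * pvB sk + pvRankN sk ((t % pvB sk : Nat) : Int) = q ↔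
      t = q / pvB sk * pvB sk + pvPermN sk (q % pvB sk) := by
  have hposb : q % pvB sk < pvB sk := Nat.mod_lt _ hb
  have hjb : t % pvB sk < pvB sk := Nat.mod_lt _ hb
  obtain ⟨hpj, hrlt⟩ := pv_permN_rank sk (t % pvB sk) hjb
  constructor
  · intro h
    have hqd : q / pvB sk * pvB sk + q % pvB sk = q := by
      have h2 := Nat.div_add_mod q (pvB sk)
      rw [Nat.mul_comm] at h2; exact h2
    rw [← hqd] at h
    obtain ⟨hdiv, hrank⟩ := pv_base_b (pvB sk) _ _ _ _ hrlt hposb h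
    have htd : t / pvB sk * pvB sk + t % pvB sk = t := by
      have h2 := Nat.div_add_mod t (pvB sk)
      rw [Nat.mul_comm] at h2; exact h2
    rw [← htd, hdiv, ← hrank, hpj]
  · intro h
    have hpb : pvPermN sk (q % pvB sk) < pvB sk := pv_permN_lt sk _ hposb
    have hdiv : t / pvB sk = q / pvB sk := by
      rw [h, Nat.mul_comm (q / pvB sk) (pvB sk), Nat.mul_add_div hb,
        Nat.div_eq_of_lt hpb, Nat.add_zero]
    have hmod : t % pvB sk = pvPermN sk (q % pvB sk) := by
      rw [h, Nat.mul_comm (q / pvB sk) (pvB sk), Nat.mul_add_mod]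
      exact Nat.mod_eq_of_lt hpb
    rw [hdiv, hmod, pv_rank_permN sk _ hposb]
    have h2 := Nat.div_add_mod q (pvB sk)
    rw [Nat.mul_comm] at h2; exact h2

-- evaluating the whole scatter loop at one output position
theorem pv_scatter_eval (tl : List Char) (g : Int → Nat) (N q : Nat) (hq : q < N)
    (t0 : Nat) (hg : ∀ t : Nat, t < tl.length → (g (t : Int) = q ↔ t = t0)) :
    ((PySem.List.enumerate tl).foldl (fun o p => o.set (g p.1) p.2)
        (List.replicate N ' '))[q]? =
      some (if _ : t0 < tl.length then tl[t0] else ' ') := by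
  rw [pv_scatter_get g _ _ q (by simpa using hq)]
  by_cases ht : t0 < tl.length
  · have hfind : ((PySem.List.enumerate tl).reverse).find? (fun p => g p.1 == q) =
        some ((t0 : Int), tl[t0]) := by
      apply pv_find?_unique
      · rw [List.mem_reverse]
        exact (PySem.List.mem_enumerate_iff _ _ _).mpr ⟨t0, ht, by simp⟩
      · simpa using (hg t0 ht).mpr rfl
      · intro y hy hpy
        rw [List.mem_reverse] at hy
        obtain ⟨k, hk, rfl⟩ := (PySem.List.mem_enumerate_iff _ _ _).mp hy
        simp only [beq_iff_eq, Int.zero_add] at hpy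
        have := (hg k hk).mp hpy
        subst this
        simp
    rw [hfind]
    simp [ht]
  · have hfind : ((PySem.List.enumerate tl).reverse).find? (fun p => g p.1 == q) = none := by
      apply List.find?_eq_none.mpr
      intro y hy
      rw [List.mem_reverse] at hy
      obtain ⟨k, hk, rfl⟩ := (PySem.List.mem_enumerate_iff _ _ _).mp hy
      simp only [beq_iff_eq, Int.zero_add]
      intro h
      have := (hg k hk).mp h
      omega
    rw [hfind]
    simp [ht, hq]

-- B equals the model
theorem pv_B_eq (sk text : String) (hpre : sk.toList ≠ []) :
    permutation_encrypt_alt sk text = String.ofList (pvModel sk text) := by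
  have hb : 0 < pvB sk := List.length_pos_iff.mpr hpre
  unfold permutation_encrypt_alt pvModel
  simp only [PySem.Str.len_eq]
  congr 1
  rw [pv_nblocks sk text hb,
    show (((pvNB sk text : Nat) : Int) * ((pvB sk : Nat) : Int)).toNat =
        pvNB sk text * pvB sk by
      rw [show ((pvNB sk text : Nat) : Int) * ((pvB sk : Nat) : Int) =
          ((pvNB sk text * pvB sk : Nat) : Int) by push_cast; ring]
      exact Int.toNat_natCast _]
  apply List.ext_getElem?
  intro q
  rcases Nat.lt_or_ge q (pvNB sk text * pvB sk) with hq | hq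
  · have hposb : q % pvB sk < pvB sk := Nat.mod_lt _ hb
    rw [pv_flatMap_get _ (pvB sk) _ (fun k _ => by simp) q hq,
      List.getElem?_map, List.getElem?_range hposb]
    rw [pv_scatter_eval text.toList
      (fun t => (PySem.Int.floordiv t ((pvB sk : Nat) : Int) * ((pvB sk : Nat) : Int) +
        PySem.List.pyGetD (pv_alt_rank sk)
          (PySem.Int.mod t ((pvB sk : Nat) : Int)) 0).toNat)
      _ q hq (q / pvB sk * pvB sk + pvPermN sk (q % pvB sk)) ?hg]
    case hg =>
      intro t ht
      beta_reduce
      rw [pv_g_spec sk hb t]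
      exact pv_g_iff sk hb q t
    unfold pvPad
    simp only [Option.map_some]
    rw [pv_getD_pad]
    by_cases ht : q / pvB sk * pvB sk + pvPermN sk (q % pvB sk) < text.toList.length
    · rw [dif_pos ht, List.getD_eq_getElem _ _ ht]
    · rw [dif_neg ht, List.getD_eq_getElem?_getD, List.getElem?_eq_none (by omega)]
      rfl
  · rw [List.getElem?_eq_none, List.getElem?_eq_none]
    · rw [pv_flatMap_len _ (pvB sk) _ (fun k _ => by simp)]
      exact hq
    · rw [pv_scatter_length (fun t => (PySem.Int.floordiv t ((pvB sk : Nat) : Int) * ((pvB sk : Nat) : Int) +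
        PySem.List.pyGetD (pv_alt_rank sk)
          (PySem.Int.mod t ((pvB sk : Nat) : Int)) 0).toNat)]
      simpa using hq

-- ===== VERDICT (by name: the statement is the Claim_ definition above) =====
theorem permutation_encrypt_spec : Claim_equal_permutation_encrypt := by
  intro sk text _ hpre
  unfold Spec_permutation_encrypt
  rw [pv_A_eq sk text hpre, pv_B_eq sk text hpre]
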